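-- pv_equiv track=rewrite | github.com/RaffaeleFiorillo/Frequency_Table_Creator | hard_work.py | absolute_frequency
-- ===== SOURCE A (Python) =====
-- def absolute_frequency(interval, new_dict, ultimo):
--     fr_tot = 0
--     lines = []
--     for i in interval:
--         current = i[0]
--         if i[-1] == ultimo:
--             while current <= i[1]:
--                 if current in new_dict:
--                     fr_tot += new_dict[current]
--                 current += 1
--             lines.append(fr_tot)
--             fr_tot = 0
--         else:
--             while current < i[1]:
--                 if current in new_dict:
--                     fr_tot += new_dict[current]
--                 current += 1
--             lines.append(fr_tot)
--             fr_tot = 0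
--     return lines
-- ===== SOURCE B (Python) =====
-- def _bisect_right(a, x):
--     lo, hi = 0, len(a)
--     while lo < hi:
--         m = (lo + hi) // 2
--         if a[m] <= x:
--             lo = m + 1
--         else:
--             hi = m
--     return lo
--
--
-- def absolute_frequency(interval, new_dict, ultimo):
--     keys = sorted(new_dict)
--     prefix = [0]
--     for k in keys:
--         prefix.append(prefix[-1] + new_dict[k])
--     lines = []
--     for i in interval:
--         lo = i[0]
--         hi = i[1] if i[-1] == ultimo else i[1] - 1
--         if lo <= hi:
--             lines.append(prefix[_bisect_right(keys, hi)] - prefix[_bisect_right(keys, lo - 1)])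
--         else:
--             lines.append(0)
--     return lines
-- ===== Notes on version B (the rewrite author's own statement) =====
-- stated objective: alternative
-- what changed: B replaces A's per-integer while-loop over each interval's whole span (one dict lookup per integer) by sorting the dict keys once, building prefix sums of their frequencies, and answering each interval with two hand-rolled binary searches.
import Mathlib
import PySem

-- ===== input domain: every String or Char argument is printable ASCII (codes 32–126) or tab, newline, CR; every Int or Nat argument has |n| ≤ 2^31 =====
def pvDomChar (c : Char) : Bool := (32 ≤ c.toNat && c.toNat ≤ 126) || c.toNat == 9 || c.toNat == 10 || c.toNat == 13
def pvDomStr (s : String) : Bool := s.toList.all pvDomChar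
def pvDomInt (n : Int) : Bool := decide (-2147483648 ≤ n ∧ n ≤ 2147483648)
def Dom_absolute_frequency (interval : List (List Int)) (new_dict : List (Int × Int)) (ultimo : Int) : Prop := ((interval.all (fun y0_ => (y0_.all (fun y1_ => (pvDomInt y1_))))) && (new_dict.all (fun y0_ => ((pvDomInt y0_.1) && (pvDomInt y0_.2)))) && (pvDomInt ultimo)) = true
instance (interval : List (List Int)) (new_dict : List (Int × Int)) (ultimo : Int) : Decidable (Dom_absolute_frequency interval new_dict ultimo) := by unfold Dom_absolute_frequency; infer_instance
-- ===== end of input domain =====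

-- ===== PORT A =====
-- B replaces A's per-integer while-loops over each interval's span by sorted keys +
-- prefix sums + a hand-rolled binary search per interval bound (objective: alternative).
-- inner while-loop of A for the branch `i[-1] == ultimo` (condition `current <= hi`)
def pvAInnerLe (d : PySem.Dict Int Int) (hi current fr_tot : Int) : Int :=
  if current ≤ hi then
    pvAInnerLe d hi (current + 1)
      (if d.contains current then fr_tot + (d.get? current).getD 0 else fr_tot)
  else fr_tot
termination_by (hi + 1 - current).toNat
decreasing_by omega

-- inner while-loop of A for the other branch (condition `current < hi`)
def pvAInnerLt (d : PySem.Dict Int Int) (hi current fr_tot : Int) : Int :=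
  if current < hi then
    pvAInnerLt d hi (current + 1)
      (if d.contains current then fr_tot + (d.get? current).getD 0 else fr_tot)
  else fr_tot
termination_by (hi - current).toNat
decreasing_by omega

def absolute_frequency (interval : List (List Int)) (new_dict : List (Int × Int)) (ultimo : Int) : List Int :=
  let d : PySem.Dict Int Int := PySem.Dict.mk new_dict
  (interval.foldl (fun (st : Int × List Int) i =>
      let current := (PySem.List.pyGet? i 0).getD 0
      if (PySem.List.pyGet? i (-1)).getD 0 = ultimo then
        (0, st.2 ++ [pvAInnerLe d ((PySem.List.pyGet? i 1).getD 0) current st.1])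
      else
        (0, st.2 ++ [pvAInnerLt d ((PySem.List.pyGet? i 1).getD 0) current st.1])
    ) (0, [])).2

-- ===== PORT B =====
-- hand-rolled bisect_right of Source B (no imports in the source module, so B rolls its own)
def pvBisectLoop (a : List Int) (x : Int) (lo hi : Int) : Int :=
  if h : lo < hi then
    let m := PySem.Int.floordiv (lo + hi) 2
    if (PySem.List.pyGet? a m).getD 0 ≤ x then pvBisectLoop a x (m + 1) hi
    else pvBisectLoop a x lo m
  else lo
termination_by (hi - lo).toNat
decreasing_by
  · have hb := PySem.Int.floordiv_two_mid_bounds (le_of_lt h)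
    omega
  · have : PySem.Int.floordiv (lo + hi) 2 < hi :=
      (PySem.Int.floordiv_lt_iff_lt_mul (by omega)).mpr (by omega)
    omega

def absolute_frequency_alt (interval : List (List Int)) (new_dict : List (Int × Int)) (ultimo : Int) : List Int :=
  let d : PySem.Dict Int Int := PySem.Dict.mk new_dict
  let keys := PySem.List.sorted d.keys id
  let pfx := keys.foldl
    (fun p k => p ++ [(PySem.List.pyGet? p (-1)).getD 0 + (d.get? k).getD 0]) [0]
  interval.map (fun i =>
    let lo := (PySem.List.pyGet? i 0).getD 0
    let hi := if (PySem.List.pyGet? i (-1)).getD 0 = ultimo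
              then (PySem.List.pyGet? i 1).getD 0
              else (PySem.List.pyGet? i 1).getD 0 - 1
    if lo ≤ hi then
      (PySem.List.pyGet? pfx (pvBisectLoop keys hi 0 keys.length)).getD 0
        - (PySem.List.pyGet? pfx (pvBisectLoop keys (lo - 1) 0 keys.length)).getD 0
    else 0)

-- ===== PRECONDITION & SPEC =====
-- Pre_ excludes intervals with fewer than 2 entries, on which Python A raises IndexError
-- (i[1] / i[0]), and association lists with duplicate keys, which cannot arise from the
-- Python dict argument (a modelling artefact of dict -> List (Int x Int)).
def Pre_absolute_frequency (interval : List (List Int)) (new_dict : List (Int × Int)) (ultimo : Int) : Prop :=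
  (∀ i ∈ interval, 2 ≤ i.length) ∧ (new_dict.map Prod.fst).Nodup
instance (interval : List (List Int)) (new_dict : List (Int × Int)) (ultimo : Int) : Decidable (Pre_absolute_frequency interval new_dict ultimo) := by unfold Pre_absolute_frequency; infer_instance

def pvWitness_absolute_frequency : List (List Int) × (List (Int × Int)) × Int :=
  ([[1, 3], [2, 5, 0]], [(2, 4), (3, 1)], 3)

def Spec_absolute_frequency (interval : List (List Int)) (new_dict : List (Int × Int)) (ultimo : Int) (out : List Int) : Prop := out = absolute_frequency_alt interval new_dict ultimo
instance (interval : List (List Int)) (new_dict : List (Int × Int)) (ultimo : Int) (out : List Int) : Decidable (Spec_absolute_frequency interval new_dict ultimo out) := by unfold Spec_absolute_frequency; infer_instance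

-- ===== CLAIM (what is proved, stated in full; the proofs are below) =====
def Claim_equal_absolute_frequency : Prop := ∀ (interval : List (List Int)) (new_dict : List (Int × Int)) (ultimo : Int), Dom_absolute_frequency interval new_dict ultimo → Pre_absolute_frequency interval new_dict ultimo → Spec_absolute_frequency interval new_dict ultimo (absolute_frequency interval new_dict ultimo)

-- ===== LEMMAS AND PROOFS =====

lemma pvAInnerLe_acc (d : PySem.Dict Int Int) (hi : Int) :
    ∀ (n : Nat) (c fr : Int), (hi + 1 - c).toNat ≤ n →
      pvAInnerLe d hi c fr = fr + pvAInnerLe d hi c 0 := by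
  intro n
  induction n with
  | zero =>
      intro c fr h
      have hc : ¬ c ≤ hi := by omega
      conv_lhs => rw [pvAInnerLe]
      conv_rhs => rw [pvAInnerLe]
      simp only [if_neg hc]; omega
  | succ n ih =>
      intro c fr h
      by_cases hc : c ≤ hi
      · conv_lhs => rw [pvAInnerLe]
        conv_rhs => rw [pvAInnerLe]
        simp only [if_pos hc]
        rw [ih (c + 1) (if d.contains c then fr + (d.get? c).getD 0 else fr) (by omega),
            ih (c + 1) (if d.contains c then 0 + (d.get? c).getD 0 else 0) (by omega)]
        split_ifs <;> omega
      · conv_lhs => rw [pvAInnerLe]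
        conv_rhs => rw [pvAInnerLe]
        simp only [if_neg hc]; omega

lemma pvAInnerLe_nil (hi : Int) :
    ∀ (n : Nat) (c fr : Int), (hi + 1 - c).toNat ≤ n →
      pvAInnerLe (PySem.Dict.mk []) hi c fr = fr := by
  intro n
  induction n with
  | zero =>
      intro c fr h
      rw [pvAInnerLe, if_neg (by omega : ¬ c ≤ hi)]
  | succ n ih =>
      intro c fr h
      rw [pvAInnerLe]
      by_cases hc : c ≤ hi
      · simp only [if_pos hc]
        have hco : (PySem.Dict.mk ([] : List (Int × Int))).contains c = false := by simp
        rw [hco]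
        simp only [Bool.false_eq_true, if_false]
        exact ih (c + 1) fr (by omega)
      · simp only [if_neg hc]

lemma pvAInnerLe_cons (k v : Int) (t : List (Int × Int)) (hk : k ∉ t.map Prod.fst)
    (hi : Int) :
    ∀ (n : Nat) (c fr : Int), (hi + 1 - c).toNat ≤ n →
      pvAInnerLe (PySem.Dict.mk ((k, v) :: t)) hi c fr
        = (if c ≤ k ∧ k ≤ hi then v else 0) + pvAInnerLe (PySem.Dict.mk t) hi c fr := by
  intro n
  induction n with
  | zero =>
      intro c fr h
      have hc : ¬ c ≤ hi := by omega
      conv_lhs => rw [pvAInnerLe]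
      conv_rhs => rw [pvAInnerLe]
      rw [if_neg hc, if_neg hc, if_neg (by omega : ¬ (c ≤ k ∧ k ≤ hi))]
      omega
  | succ n ih =>
      intro c fr h
      by_cases hc : c ≤ hi
      · have hget : (PySem.Dict.mk ((k, v) :: t)).get? c
            = if k == c then some v else (PySem.Dict.mk t).get? c :=
          PySem.Dict.get?_mk_cons k v t c
        have hcon : (PySem.Dict.mk ((k, v) :: t)).contains c
            = (if k == c then some v else (PySem.Dict.mk t).get? c).isSome := by
          rw [PySem.Dict.contains_eq_isSome_get? _ _, hget]
        have hcon' : (PySem.Dict.mk t).contains c = ((PySem.Dict.mk t).get? c).isSome :=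
          PySem.Dict.contains_eq_isSome_get? _ _
        conv_lhs => rw [pvAInnerLe]
        simp only [if_pos hc]
        rw [ih (c + 1) _ (by omega)]
        conv_rhs => rw [pvAInnerLe]
        simp only [if_pos hc]
        by_cases hkc : k = c
        · -- the head key is hit exactly at this step; it does not occur in the tail
          subst hkc
          have hnone : (PySem.Dict.mk t).get? k = none := by
            rw [PySem.Dict.get?_eq_none_iff_not_mem_keys]
            simpa using hk
          rw [hget, hcon, hcon', hnone]
          simp only [beq_self_eq_true, if_true, Option.isSome_some, Option.isSome_none,
            Bool.false_eq_true, if_false, Option.getD_some]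
          rw [if_neg (by omega : ¬ (k + 1 ≤ k ∧ k ≤ hi)), if_pos (by omega : k ≤ k ∧ k ≤ hi),
            pvAInnerLe_acc (PySem.Dict.mk t) hi ((hi + 1 - (k + 1)).toNat) (k + 1) (fr + v) le_rfl,
            pvAInnerLe_acc (PySem.Dict.mk t) hi ((hi + 1 - (k + 1)).toNat) (k + 1) fr le_rfl]
          omega
        · have hbeq : (k == c) = false := by simp [hkc]
          rw [hget, hcon, hcon', hbeq]
          simp only [Bool.false_eq_true, if_false]
          have hiff : (c + 1 ≤ k ∧ k ≤ hi) ↔ (c ≤ k ∧ k ≤ hi) := by omega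
          simp only [hiff]
      · have hc' : ¬ (c ≤ k ∧ k ≤ hi) := by omega
        conv_lhs => rw [pvAInnerLe]
        conv_rhs => rw [pvAInnerLe]
        rw [if_neg hc, if_neg hc, if_neg hc']
        omega

lemma pvAInnerLe_eq_filterSum (l : List (Int × Int)) (hnd : (l.map Prod.fst).Nodup)
    (hi lo : Int) :
    pvAInnerLe (PySem.Dict.mk l) hi lo 0
      = ((l.filter (fun kv => decide (lo ≤ kv.1) && decide (kv.1 ≤ hi))).map Prod.snd).sum := by
  induction l with
  | nil => simp [pvAInnerLe_nil hi ((hi + 1 - lo).toNat) lo 0 le_rfl]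
  | cons p t ih =>
      obtain ⟨k, v⟩ := p
      simp only [List.map_cons, List.nodup_cons] at hnd
      rw [pvAInnerLe_cons k v t hnd.1 hi ((hi + 1 - lo).toNat) lo 0 le_rfl, ih hnd.2]
      by_cases hp : lo ≤ k ∧ k ≤ hi
      · rw [if_pos hp, List.filter_cons_of_pos (by simpa using hp)]
        simp
      · rw [if_neg hp, List.filter_cons_of_neg (by simpa using hp)]
        omega

lemma pvAInnerLt_eq_le (d : PySem.Dict Int Int) (hi : Int) :
    ∀ (n : Nat) (c fr : Int), (hi - c).toNat ≤ n →
      pvAInnerLt d hi c fr = pvAInnerLe d (hi - 1) c fr := by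
  intro n
  induction n with
  | zero =>
      intro c fr h
      rw [pvAInnerLt, pvAInnerLe, if_neg (by omega : ¬ c < hi), if_neg (by omega : ¬ c ≤ hi - 1)]
  | succ n ih =>
      intro c fr h
      rw [pvAInnerLt, pvAInnerLe]
      by_cases hc : c < hi
      · rw [if_pos hc, if_pos (by omega : c ≤ hi - 1)]
        exact ih (c + 1) _ (by omega)
      · rw [if_neg hc, if_neg (by omega : ¬ c ≤ hi - 1)]

-- the common normal form: per-interval inclusive-bound filtered sum over the pairs
def pvElem (new_dict : List (Int × Int)) (ultimo : Int) (i : List Int) : Int :=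
  let lo := (PySem.List.pyGet? i 0).getD 0
  let hi := if (PySem.List.pyGet? i (-1)).getD 0 = ultimo
            then (PySem.List.pyGet? i 1).getD 0
            else (PySem.List.pyGet? i 1).getD 0 - 1
  ((new_dict.filter (fun kv => decide (lo ≤ kv.1) && decide (kv.1 ≤ hi))).map Prod.snd).sum

-- A's outer foldl appends pvElem per interval
lemma pvFoldl_eq (new_dict : List (Int × Int)) (hnd : (new_dict.map Prod.fst).Nodup)
    (ultimo : Int) :
    ∀ (interval : List (List Int)) (acc : List Int),
      (interval.foldl (fun (st : Int × List Int) i =>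
          let current := (PySem.List.pyGet? i 0).getD 0
          if (PySem.List.pyGet? i (-1)).getD 0 = ultimo then
            (0, st.2 ++ [pvAInnerLe (PySem.Dict.mk new_dict) ((PySem.List.pyGet? i 1).getD 0) current st.1])
          else
            (0, st.2 ++ [pvAInnerLt (PySem.Dict.mk new_dict) ((PySem.List.pyGet? i 1).getD 0) current st.1])
        ) (0, acc)).2
      = acc ++ interval.map (pvElem new_dict ultimo) := by
  intro interval
  induction interval with
  | nil => intro acc; simp
  | cons i L ih =>
      intro acc
      rw [List.foldl_cons]
      by_cases hu : (PySem.List.pyGet? i (-1)).getD 0 = ultimo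
      · simp only [if_pos hu]
        rw [ih (acc ++ [pvAInnerLe (PySem.Dict.mk new_dict) ((PySem.List.pyGet? i 1).getD 0)
          ((PySem.List.pyGet? i 0).getD 0) 0])]
        have he : pvAInnerLe (PySem.Dict.mk new_dict) ((PySem.List.pyGet? i 1).getD 0)
            ((PySem.List.pyGet? i 0).getD 0) 0 = pvElem new_dict ultimo i := by
          rw [pvAInnerLe_eq_filterSum new_dict hnd _ _]
          simp only [pvElem, if_pos hu]
        rw [he]
        simp
      · simp only [if_neg hu]
        rw [ih (acc ++ [pvAInnerLt (PySem.Dict.mk new_dict) ((PySem.List.pyGet? i 1).getD 0)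
          ((PySem.List.pyGet? i 0).getD 0) 0])]
        have he : pvAInnerLt (PySem.Dict.mk new_dict) ((PySem.List.pyGet? i 1).getD 0)
            ((PySem.List.pyGet? i 0).getD 0) 0 = pvElem new_dict ultimo i := by
          rw [pvAInnerLt_eq_le (PySem.Dict.mk new_dict) _
              (((PySem.List.pyGet? i 1).getD 0 - (PySem.List.pyGet? i 0).getD 0).toNat) _ 0 le_rfl,
            pvAInnerLe_eq_filterSum new_dict hnd _ _]
          simp only [pvElem, if_neg hu]
        rw [he]
        simp

-- scan characterisation of B's prefix-sum loop
def pvScan (d : PySem.Dict Int Int) (s : Int) : List Int → List Int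
  | [] => []
  | k :: t => (s + (d.get? k).getD 0) :: pvScan d (s + (d.get? k).getD 0) t

lemma pvGet_neg_one_append (acc : List Int) (y : Int) :
    (PySem.List.pyGet? (acc ++ [y]) (-1)).getD 0 = y := by
  simp [PySem.List.pyGet?, PySem.List.pyIdx?]

lemma pvPrefix_eq (d : PySem.Dict Int Int) :
    ∀ (ks : List Int) (acc : List Int) (s : Int),
      (PySem.List.pyGet? acc (-1)).getD 0 = s → acc ≠ [] →
      ks.foldl (fun p k => p ++ [(PySem.List.pyGet? p (-1)).getD 0 + (d.get? k).getD 0]) acc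
        = acc ++ pvScan d s ks := by
  intro ks
  induction ks with
  | nil => intro acc s _ _; simp [pvScan]
  | cons k t ih =>
      intro acc s hs hne
      rw [List.foldl_cons, hs,
        ih (acc ++ [s + (d.get? k).getD 0]) (s + (d.get? k).getD 0)
          (pvGet_neg_one_append acc _) (by simp)]
      simp [pvScan]

lemma pvScan_get (d : PySem.Dict Int Int) :
    ∀ (ks : List Int) (s : Int) (j : Nat), j ≤ ks.length →
      (s :: pvScan d s ks)[j]? = some (s + ((ks.take j).map (fun k => (d.get? k).getD 0)).sum) := by
  intro ks
  induction ks with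
  | nil =>
      intro s j hj
      have : j = 0 := by simpa using hj
      subst this
      simp [pvScan]
  | cons k t ih =>
      intro s j hj
      cases j with
      | zero => simp
      | succ j =>
          simp only [pvScan, List.getElem?_cons_succ]
          rw [ih (s + (d.get? k).getD 0) j (by simpa using hj)]
          simp [add_assoc]

-- if everything before index lo is ≤ x and everything from lo on is > x, the count of ≤ x is lo
lemma pvCountP_of_split (ks : List Int) (x : Int) (lo : Int) (h0 : 0 ≤ lo)
    (hlen : lo ≤ ks.length)
    (hlow : ∀ (j : Nat) (hj : j < ks.length), (j : Int) < lo → ks[j] ≤ x)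
    (hhigh : ∀ (j : Nat) (hj : j < ks.length), lo ≤ (j : Int) → x < ks[j]) :
    lo = (ks.countP (fun k => decide (k ≤ x)) : Int) := by
  conv_rhs => rw [← List.take_append_drop lo.toNat ks]
  rw [List.countP_append]
  have h1 : (ks.take lo.toNat).countP (fun k => decide (k ≤ x)) = (ks.take lo.toNat).length := by
    rw [List.countP_eq_length]
    intro a ha
    obtain ⟨j, hj, rfl⟩ := List.mem_iff_getElem.mp ha
    have hj' : j < ks.length := by
      have := List.length_take_le lo.toNat ks
      omega
    rw [List.getElem_take]
    simp only [decide_eq_true_eq]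
    refine hlow j hj' ?_
    rw [List.length_take] at hj
    omega
  have h2 : (ks.drop lo.toNat).countP (fun k => decide (k ≤ x)) = 0 := by
    rw [List.countP_eq_zero]
    intro a ha
    obtain ⟨j, hj, rfl⟩ := List.mem_iff_getElem.mp ha
    rw [List.getElem_drop]
    simp only [decide_eq_true_eq, not_le]
    refine hhigh (lo.toNat + j) (by rw [List.length_drop] at hj; omega) (by omega)
  rw [h1, h2, List.length_take]
  omega

-- B's binary search returns the number of keys ≤ x on a sorted list
lemma pvBisect_eq_countP (ks : List Int) (x : Int) (hs : ks.Pairwise (· ≤ ·)) :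
    ∀ (n : Nat) (lo hi : Int), (hi - lo).toNat ≤ n →
      0 ≤ lo → lo ≤ hi → hi ≤ ks.length →
      (∀ (j : Nat) (hj : j < ks.length), (j : Int) < lo → ks[j] ≤ x) →
      (∀ (j : Nat) (hj : j < ks.length), hi ≤ (j : Int) → x < ks[j]) →
      pvBisectLoop ks x lo hi = (ks.countP (fun k => decide (k ≤ x)) : Int) := by
  intro n
  induction n with
  | zero =>
      intro lo hi hn h0 hlh hhi hlow hhigh
      rw [pvBisectLoop, dif_neg (by omega : ¬ lo < hi)]
      exact pvCountP_of_split ks x lo h0 (by omega) hlow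
        (fun j hj hge => hhigh j hj (by omega))
  | succ n ih =>
      intro lo hi hn h0 hlh hhi hlow hhigh
      rw [pvBisectLoop]
      by_cases hc : lo < hi
      · rw [dif_pos hc]
        have hb := PySem.Int.floordiv_two_mid_bounds (le_of_lt hc)
        have hmlt : PySem.Int.floordiv (lo + hi) 2 < hi :=
          (PySem.Int.floordiv_lt_iff_lt_mul (by omega)).mpr (by omega)
        set m := PySem.Int.floordiv (lo + hi) 2 with hm
        have hmn : m = ((m.toNat : Nat) : Int) := by omega
        have hmlen : m.toNat < ks.length := by omega
        have hget : PySem.List.pyGet? ks m = some ks[m.toNat] := by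
          conv_lhs => rw [hmn]
          rw [PySem.List.pyGet?_natCast]
          exact List.getElem?_eq_getElem hmlen
        by_cases hx : ks[m.toNat] ≤ x
        · rw [if_pos (by rw [hget]; exact hx)]
          refine ih (m + 1) hi (by omega) (by omega) (by omega) hhi ?_ hhigh
          intro j hj hjm
          by_cases hje : j = m.toNat
          · subst hje; exact hx
          · have hjlt : j < m.toNat := by omega
            have := (List.pairwise_iff_getElem.mp hs) j m.toNat hj hmlen hjlt
            omega
        · rw [if_neg (by rw [hget]; exact hx)]
          refine ih lo m (by omega) h0 (by omega) (by omega) hlow ?_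
          intro j hj hjm
          by_cases hje : j = m.toNat
          · subst hje; omega
          · have hjgt : m.toNat < j := by omega
            have := (List.pairwise_iff_getElem.mp hs) m.toNat j hmlen hj hjgt
            omega
      · rw [dif_neg hc]
        exact pvCountP_of_split ks x lo h0 (by omega) hlow
          (fun j hj hge => hhigh j hj (by omega))

lemma pvTake_countP (x : Int) :
    ∀ (ks : List Int), ks.Pairwise (· ≤ ·) →
      ks.take (ks.countP (fun k => decide (k ≤ x))) = ks.filter (fun k => decide (k ≤ x)) := by
  intro ks
  induction ks with
  | nil => simp
  | cons k t ih =>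
      intro hp
      rw [List.pairwise_cons] at hp
      by_cases hk : k ≤ x
      · simp only [List.countP_cons, List.filter_cons, decide_eq_true hk]
        simp [List.take_succ_cons, ih hp.2]
      · have h0 : t.countP (fun k => decide (k ≤ x)) = 0 := by
          rw [List.countP_eq_zero]
          intro a ha
          have := hp.1 a ha
          simp only [decide_eq_true_eq]
          omega
        have hf : t.filter (fun k => decide (k ≤ x)) = [] := by
          rw [List.filter_eq_nil_iff]
          intro a ha
          have := hp.1 a ha
          simp only [decide_eq_true_eq]
          omega
        simp [hk, h0, hf]

lemma pvFilter_split (g : Int → Int) (lo hi : Int) (hlh : lo ≤ hi) :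
    ∀ (ks : List Int),
      ((ks.filter (fun k => decide (k ≤ hi))).map g).sum
        - ((ks.filter (fun k => decide (k ≤ lo - 1))).map g).sum
      = ((ks.filter (fun k => decide (lo ≤ k) && decide (k ≤ hi))).map g).sum := by
  intro ks
  induction ks with
  | nil => simp
  | cons k t ih =>
      by_cases h2 : k ≤ hi
      · by_cases h1 : k ≤ lo - 1
        · have h3 : ¬ lo ≤ k := by omega
          simp only [List.filter_cons, decide_eq_true h1, decide_eq_true h2,
            decide_eq_false h3, Bool.false_and, if_true, Bool.false_eq_true, if_false,
            List.map_cons, List.sum_cons]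
          omega
        · have h3 : lo ≤ k := by omega
          simp only [List.filter_cons, decide_eq_true h2, decide_eq_false h1,
            decide_eq_true h3, Bool.true_and, if_true, Bool.false_eq_true, if_false,
            List.map_cons, List.sum_cons]
          omega
      · have h1 : ¬ k ≤ lo - 1 := by omega
        simp only [List.filter_cons, decide_eq_false h2, decide_eq_false h1, Bool.and_false,
          Bool.false_eq_true, if_false]
        exact ih

-- B's prefix-sum value at a bisected index is a filtered sum over the pairs
lemma pvPrefixAt (new_dict : List (Int × Int)) (x : Int) :
    (PySem.List.pyGet?
        ((PySem.List.sorted (PySem.Dict.mk new_dict).keys id).foldl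
          (fun p k => p ++ [(PySem.List.pyGet? p (-1)).getD 0
            + ((PySem.Dict.mk new_dict).get? k).getD 0]) [0])
        (pvBisectLoop (PySem.List.sorted (PySem.Dict.mk new_dict).keys id) x 0
          (PySem.List.sorted (PySem.Dict.mk new_dict).keys id).length)).getD 0
      = (((PySem.List.sorted (PySem.Dict.mk new_dict).keys id).filter
            (fun k => decide (k ≤ x))).map
          (fun k => ((PySem.Dict.mk new_dict).get? k).getD 0)).sum := by
  have hpair : (PySem.List.sorted (PySem.Dict.mk new_dict).keys id).Pairwise (· ≤ ·) := by
    simpa using PySem.List.sorted_pairwise (PySem.Dict.mk new_dict).keys id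
  rw [pvPrefix_eq (PySem.Dict.mk new_dict) _ [0] 0
      (by simp [PySem.List.pyGet?, PySem.List.pyIdx?]) (by simp)]
  rw [pvBisect_eq_countP _ x hpair
      (PySem.List.sorted (PySem.Dict.mk new_dict).keys id).length 0 _
      (by omega) (by omega) (by omega) (by omega)
      (fun j hj hlt => absurd hlt (by omega))
      (fun j hj hge => absurd hge (by omega))]
  rw [PySem.List.pyGet?_natCast]
  have := pvScan_get (PySem.Dict.mk new_dict) (PySem.List.sorted (PySem.Dict.mk new_dict).keys id)
      0 ((PySem.List.sorted (PySem.Dict.mk new_dict).keys id).countP (fun k => decide (k ≤ x)))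
      List.countP_le_length
  rw [List.cons_append, List.nil_append, this, pvTake_countP x _ hpair]
  simp

-- B's per-interval expression equals the filtered sum over the pairs
lemma pvB_elem (new_dict : List (Int × Int)) (hnd : (new_dict.map Prod.fst).Nodup)
    (lo hi : Int) :
    (if lo ≤ hi then
        (PySem.List.pyGet?
            ((PySem.List.sorted (PySem.Dict.mk new_dict).keys id).foldl
              (fun p k => p ++ [(PySem.List.pyGet? p (-1)).getD 0
                + ((PySem.Dict.mk new_dict).get? k).getD 0]) [0])
            (pvBisectLoop (PySem.List.sorted (PySem.Dict.mk new_dict).keys id) hi 0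
              (PySem.List.sorted (PySem.Dict.mk new_dict).keys id).length)).getD 0
          - (PySem.List.pyGet?
            ((PySem.List.sorted (PySem.Dict.mk new_dict).keys id).foldl
              (fun p k => p ++ [(PySem.List.pyGet? p (-1)).getD 0
                + ((PySem.Dict.mk new_dict).get? k).getD 0]) [0])
            (pvBisectLoop (PySem.List.sorted (PySem.Dict.mk new_dict).keys id) (lo - 1) 0
              (PySem.List.sorted (PySem.Dict.mk new_dict).keys id).length)).getD 0
      else 0)
    = ((new_dict.filter (fun kv => decide (lo ≤ kv.1) && decide (kv.1 ≤ hi))).map Prod.snd).sum := by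
  by_cases hlh : lo ≤ hi
  · rw [if_pos hlh, pvPrefixAt new_dict hi, pvPrefixAt new_dict (lo - 1),
      pvFilter_split _ lo hi hlh _]
    have hperm : (PySem.List.sorted (PySem.Dict.mk new_dict).keys id).Perm
        (new_dict.map Prod.fst) := by
      simpa using PySem.List.sorted_perm (PySem.Dict.mk new_dict).keys id false
    rw [List.Perm.sum_eq ((hperm.filter _).map (fun k => ((PySem.Dict.mk new_dict).get? k).getD 0)),
      List.filter_map, List.map_map]
    have hfc : new_dict.filter ((fun k => decide (lo ≤ k) && decide (k ≤ hi)) ∘ Prod.fst)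
        = new_dict.filter (fun kv => decide (lo ≤ kv.1) && decide (kv.1 ≤ hi)) :=
      List.filter_congr (fun kv _ => rfl)
    rw [hfc]
    refine congrArg List.sum (List.map_congr_left ?_)
    intro kv hkv
    have hg : (PySem.Dict.mk new_dict).get? kv.1 = some kv.2 := by
      apply PySem.Dict.get?_of_mem_items
      · simpa using List.mem_of_mem_filter hkv
      · simpa [PySem.Dict.keys] using hnd
    simp [Function.comp, hg]
  · rw [if_neg hlh]
    have hnil : new_dict.filter (fun kv => decide (lo ≤ kv.1) && decide (kv.1 ≤ hi)) = [] := by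
      rw [List.filter_eq_nil_iff]
      intro kv _
      simp only [Bool.and_eq_true, decide_eq_true_eq, not_and]
      omega
    rw [hnil]
    simp

-- B's per-interval value is pvElem
lemma pvAlt_eq (new_dict : List (Int × Int)) (hnd : (new_dict.map Prod.fst).Nodup)
    (ultimo : Int) (interval : List (List Int)) :
    absolute_frequency_alt interval new_dict ultimo
      = interval.map (pvElem new_dict ultimo) := by
  simp only [absolute_frequency_alt]
  refine List.map_congr_left ?_
  intro i _
  simp only [pvElem]
  exact pvB_elem new_dict hnd _ _

-- ===== VERDICT (by name: the statement is the Claim_ definition above) =====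
theorem absolute_frequency_spec : Claim_equal_absolute_frequency := by
  intro interval new_dict ultimo _ hpre
  unfold Spec_absolute_frequency absolute_frequency
  rw [pvAlt_eq new_dict hpre.2 ultimo interval]
  simpa using pvFoldl_eq new_dict hpre.2 ultimo interval []
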